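-- pv_equiv track=rewrite | github.com/weiyinfu/DailyAlgorithm | 排列组合概率论/核酸问题/05-dp-wrong.py | f
-- ===== SOURCE A (Python) =====
-- ma = {}
--
-- def f(n, m, k):
--     kk = (n, m, k)
--     if kk in ma:
--         return ma[kk]
--     if n == 0:
--         return 1
--     if m == 0:
--         return 0
--     ans = 0
--     for i in range(min(k + 1, n + 1)):
--         ans += f(n - i, m - 1, k)
--     ma[kk] = ans
--     return ans
-- ===== SOURCE B (Python) =====
-- # Bottom-up row DP with an O(1) sliding-window sum instead of memoized
-- # recursion with an O(k) inner loop.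
-- def f(n, m, k):
--     if n == 0:
--         return 1
--     if n < 0 or m <= 0 or k < 0:
--         return 0
--     if n > m * k:  # m parts of at most k each cannot sum to n
--         return 0
--     dp = [1] + [0] * n
--     for _ in range(m):
--         new = []
--         window = 0
--         for s in range(n + 1):
--             window += dp[s]
--             if s - k - 1 >= 0:
--                 window -= dp[s - k - 1]
--             new.append(window)
--         dp = new
--     return dp[-1]
-- ===== Notes on version B (the rewrite author's own statement) =====
-- stated objective: faster
-- what changed: Replaced the memoized top-down recursion (whose inner loop sums up to k+1 previous values per state) by an iterative bottom-up row DP with an O(1) sliding-window sum per cell and an n > m*k early-out; B is iterative, so it cannot hit Python's recursion limit.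
-- outside the precondition, e.g. on f(2, -1, 0): A raises RecursionError, B returns 0; on f(1, 2000, 1): A returns 2000, B returns 2000; on f(1, 20000, 1): A raises RecursionError, B returns 20000
import Mathlib
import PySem

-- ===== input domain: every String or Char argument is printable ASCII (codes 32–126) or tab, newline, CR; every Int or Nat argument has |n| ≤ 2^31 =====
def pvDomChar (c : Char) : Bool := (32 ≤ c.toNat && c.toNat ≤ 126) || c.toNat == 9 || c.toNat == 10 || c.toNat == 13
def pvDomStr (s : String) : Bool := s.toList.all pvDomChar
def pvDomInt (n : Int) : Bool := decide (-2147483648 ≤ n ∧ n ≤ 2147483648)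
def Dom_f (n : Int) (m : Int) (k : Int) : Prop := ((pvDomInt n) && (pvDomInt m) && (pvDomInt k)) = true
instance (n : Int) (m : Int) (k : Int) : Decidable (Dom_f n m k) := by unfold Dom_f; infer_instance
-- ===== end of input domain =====

-- B replaces A's memoized recursion (O(k) inner sum per state) by an iterative
-- bottom-up row DP with an O(1) sliding-window sum per cell.
-- (A mutates the module-level memo dict `ma`; the equivalence proved here is about the return value.)

-- ===== PORT A =====
-- A is a recursion memoized through the module-level dict `ma` (a Python hash
-- map, ported as Std.HashMap keyed by the (n, m, k) triple; Lean has no global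
-- mutable state, so each top-level call starts from the empty memo — the memo
-- only caches already-computed results, so the returned value is unchanged).
-- The fuel is m.toNat: under Pre_f every recursive chain decreases m down to
-- the m = 0 base case, so the fuel-0 branch is reached only when Python's loop
-- is empty (value 0).
def fAm : Nat → Int → Int → Int → Std.HashMap (Int × Int × Int) Int →
    Int × Std.HashMap (Int × Int × Int) Int
  | fuel, n, m, k, ma =>
    match ma[(n, m, k)]? with
    | some v => (v, ma)
    | none =>
      if n = 0 then (1, ma)
      else if m = 0 then (0, ma)
      else
        match fuel with
        | 0 => (0, ma)
        | Nat.succ fu =>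
          let r := (PySem.List.pyRange 0 (min (k + 1) (n + 1)) 1).foldl
            (fun (st : Int × Std.HashMap (Int × Int × Int) Int) i =>
              let p := fAm fu (n - i) (m - 1) k st.2
              (st.1 + p.1, p.2))
            (0, ma)
          (r.1, r.2.insert (n, m, k) r.1)

def f (n : Int) (m : Int) (k : Int) : Int := (fAm m.toNat n m k ∅).1

-- ===== PORT B =====
-- one pass of the inner 'for s in range(n+1)' loop, state = (window, new)
def stepRow (n k : Int) (dp : List Int) : List Int :=
  ((PySem.List.pyRange 0 (n + 1) 1).foldl
    (fun (st : Int × List Int) s =>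
      let w0 := st.1 + PySem.List.pyGetD dp s 0
      let w := if 0 ≤ s - k - 1 then w0 - PySem.List.pyGetD dp (s - k - 1) 0 else w0
      (w, st.2 ++ [w]))
    (0, ([] : List Int))).2

def f_alt (n : Int) (m : Int) (k : Int) : Int :=
  if n = 0 then 1
  else if n < 0 ∨ m ≤ 0 ∨ k < 0 then 0
  else if m * k < n then 0  -- m parts of at most k each cannot sum to n
  else
    let dp := (PySem.List.pyRange 0 m 1).foldl (fun dp _ => stepRow n k dp)
      (1 :: List.replicate n.toNat 0)
    PySem.List.pyGetD dp (-1) 0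

-- ===== PRECONDITION & SPEC =====
-- For n > 0 and k ≥ 0 A's recursion is m levels deep (the i = 0 call keeps n
-- unchanged and decreases m by 1), so A raises RecursionError there whenever
-- m < 0 (m never reaches 0) or m reaches the interpreter's recursion limit;
-- Pre_f excludes that whole deep-recursion regime, with a wide safety margin
-- below CPython's limit — in the margin (2000 ≤ m < the actual limit) A still
-- returns and B returns the same value (see the cite in claim.json).
def Pre_f (n : Int) (m : Int) (k : Int) : Prop := ¬ (0 < n ∧ 0 ≤ k ∧ (m < 0 ∨ 2000 ≤ m))
instance (n : Int) (m : Int) (k : Int) : Decidable (Pre_f n m k) := by unfold Pre_f; infer_instance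
def pvWitness_f : Int × Int × Int := (3, 2, 2)

def Spec_f (n : Int) (m : Int) (k : Int) (out : Int) : Prop := out = f_alt n m k
instance (n : Int) (m : Int) (k : Int) (out : Int) : Decidable (Spec_f n m k out) := by unfold Spec_f; infer_instance

-- ===== CLAIM (what is proved, stated in full; the proofs are below) =====
def Claim_equal_f : Prop := ∀ (n : Int) (m : Int) (k : Int), Dom_f n m k → Pre_f n m k → Spec_f n m k (f n m k)

-- ===== LEMMAS AND PROOFS =====

-- fApure: A's recursion without the memo (proof-side reference; fAm below is
-- shown to return its value)
def fApure : Nat → Int → Int → Int → Int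
  | fuel, n, m, k =>
    if n = 0 then 1
    else if m = 0 then 0
    else
      match fuel with
      | 0 => 0
      | Nat.succ fu =>
        (PySem.List.pyRange 0 (min (k + 1) (n + 1)) 1).foldl
          (fun ans i => ans + fApure fu (n - i) (m - 1) k) 0

-- the memo invariant: every cached value is the value of the plain recursion
abbrev MemoOK (ma : Std.HashMap (Int × Int × Int) Int) : Prop :=
  ∀ (p : Int × Int × Int) (v : Int), ma[p]? = some v → v = fApure p.2.1.toNat p.1 p.2.1 p.2.2

lemma fAm_pure : ∀ (t : Nat) (n m k : Int) (ma : Std.HashMap (Int × Int × Int) Int),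
    m.toNat = t → MemoOK ma →
    (fAm t n m k ma).1 = fApure t n m k ∧ MemoOK (fAm t n m k ma).2 := by
  intro t
  induction t with
  | zero =>
    intro n m k ma hmt hok
    match hma : ma[(n, m, k)]? with
    | some v =>
      have hv := hok (n, m, k) v hma
      simp only [fAm, hma]
      exact ⟨by rw [hv, hmt], hok⟩
    | none =>
      by_cases h0 : n = 0
      · subst h0; simp only [fAm, hma]
        exact ⟨by simp [fApure], hok⟩
      by_cases hm0 : m = 0
      · subst hm0; simp only [fAm, hma, if_neg h0]
        exact ⟨by simp [fApure, h0], hok⟩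
      · simp only [fAm, hma, if_neg h0, if_neg hm0]
        exact ⟨by simp [fApure, h0, hm0], hok⟩
  | succ t ih =>
    intro n m k ma hmt hok
    match hma : ma[(n, m, k)]? with
    | some v =>
      have hv := hok (n, m, k) v hma
      simp only [fAm, hma]
      exact ⟨by rw [hv, hmt], hok⟩
    | none =>
      by_cases h0 : n = 0
      · subst h0; simp only [fAm, hma]
        exact ⟨by simp [fApure], hok⟩
      by_cases hm0 : m = 0
      · subst hm0; simp only [fAm, hma, if_neg h0]
        exact ⟨by simp [fApure, h0], hok⟩
      -- the recursive branch: m.toNat = t + 1, so (m - 1).toNat = t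
      have hm1 : (m - 1).toNat = t := by omega
      have hfold : ∀ (l : List Int) (acc : Int) (ma₀ : Std.HashMap (Int × Int × Int) Int), MemoOK ma₀ →
          (l.foldl (fun (st : Int × Std.HashMap (Int × Int × Int) Int) i =>
              let p := fAm t (n - i) (m - 1) k st.2
              (st.1 + p.1, p.2)) (acc, ma₀)).1
            = l.foldl (fun ans i => ans + fApure t (n - i) (m - 1) k) acc ∧
          MemoOK (l.foldl (fun (st : Int × Std.HashMap (Int × Int × Int) Int) i =>
              let p := fAm t (n - i) (m - 1) k st.2
              (st.1 + p.1, p.2)) (acc, ma₀)).2 := by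
        intro l
        induction l with
        | nil => intro acc ma₀ hok₀; exact ⟨rfl, hok₀⟩
        | cons x xs ihl =>
          intro acc ma₀ hok₀
          obtain ⟨hx1, hx2⟩ := ih (n - x) (m - 1) k ma₀ hm1 hok₀
          simp only [List.foldl_cons]
          rw [hx1]
          exact ihl (acc + fApure t (n - x) (m - 1) k) (fAm t (n - x) (m - 1) k ma₀).2 hx2
      obtain ⟨hr1, hr2⟩ := hfold (PySem.List.pyRange 0 (min (k + 1) (n + 1)) 1) 0 ma hok
      simp only [fAm, hma, if_neg h0, if_neg hm0]
      constructor
      · rw [hr1]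
        simp [fApure, h0, hm0]
      · intro p v hpv
        rw [Std.HashMap.getElem?_insert] at hpv
        by_cases hpk : p = (n, m, k)
        · subst hpk
          rw [if_pos (by simp), Option.some_inj] at hpv
          rw [← hpv, hr1]
          have hsh : ((n, m, k) : Int × Int × Int).2.1.toNat = t + 1 := hmt
          rw [hsh]
          simp [fApure, h0, hm0]
        · rw [if_neg (by simp [beq_iff_eq]; intro h; exact hpk h.symm)] at hpv
          exact hr2 p v hpv
  
lemma f_eq_pure (n m k : Int) : f n m k = fApure m.toNat n m k := by
  have hok : MemoOK (∅ : Std.HashMap (Int × Int × Int) Int) := by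
    intro p v hpv
    simp at hpv
  exact (fAm_pure m.toNat n m k ∅ rfl hok).1

-- the mathematical recurrence: ct k s t = number of ways to write s as an
-- ordered sum of t parts, each in [0, k]
def ct (k : Int) : Nat → Nat → Int
  | s, 0 => if s = 0 then 1 else 0
  | s, t+1 => ((List.range (min (k + 1) ((s : Int) + 1)).toNat).map (fun i => ct k (s - i) t)).sum

lemma ct_zero (k : Int) (hk : 0 ≤ k) : ∀ t : Nat, ct k 0 t = 1 := by
  intro t
  induction t with
  | zero => simp [ct]
  | succ t ih =>
    have h1 : (min (k + 1) ((0 : Int) + 1)).toNat = 1 := by omega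
    simp only [ct, Nat.cast_zero, h1]
    simp [ih]

lemma ct_slide (k : Int) (hk : 0 ≤ k) (t j : Nat) (hj : 1 ≤ j) :
    ct k j (t+1) = ct k (j-1) (t+1) + ct k j t
      - (if 0 ≤ (j : Int) - k - 1 then ct k ((j : Int) - k - 1).toNat t else 0) := by
  have hmap : (List.range j).map ((fun i => ct k (j - i) t) ∘ Nat.succ)
      = (List.range j).map (fun i => ct k (j - 1 - i) t) := by
    apply List.map_congr_left; intro i _
    simp only [Function.comp]; congr 1; omega
  by_cases hcase : (j : Int) ≤ k
  · have hcond : ¬ 0 ≤ (j : Int) - k - 1 := by omega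
    have hL1 : (min (k + 1) ((j : Int) + 1)).toNat = j + 1 := by omega
    have hL2 : (min (k + 1) (((j - 1 : Nat) : Int) + 1)).toNat = j := by omega
    have hj1 : j - (0 : Nat) = j := by omega
    simp only [ct, hL1, hL2, if_neg hcond]
    rw [List.range_succ_eq_map, List.map_cons, List.sum_cons, List.map_map, hmap, hj1]
    ring
  · have hcond : 0 ≤ (j : Int) - k - 1 := by omega
    have hL1 : (min (k + 1) ((j : Int) + 1)).toNat = k.toNat + 1 := by omega
    have hL2 : (min (k + 1) (((j - 1 : Nat) : Int) + 1)).toNat = k.toNat + 1 := by omega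
    have hidx : ((j : Int) - k - 1).toNat = j - 1 - k.toNat := by omega
    have hmap2 : (List.range k.toNat).map ((fun i => ct k (j - i) t) ∘ Nat.succ)
        = (List.range k.toNat).map (fun i => ct k (j - 1 - i) t) := by
      apply List.map_congr_left; intro i _
      simp only [Function.comp]; congr 1; omega
    have hj1 : j - (0 : Nat) = j := by omega
    simp only [ct, hL1, hL2, if_pos hcond, hidx]
    conv_lhs => rw [List.range_succ_eq_map, List.map_cons, List.sum_cons, List.map_map, hmap2, hj1]
    conv_rhs => rw [List.range_succ, List.map_append, List.sum_append, List.map_cons,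
      List.map_nil, List.sum_cons, List.sum_nil]
    ring

lemma stepRow_eq (n k : Int) (hn : 0 < n) (hk : 0 ≤ k) (t : Nat) :
    stepRow n k ((PySem.List.pyRange 0 (n + 1) 1).map (fun s => ct k s.toNat t))
      = (PySem.List.pyRange 0 (n + 1) 1).map (fun s => ct k s.toNat (t+1)) := by
  have key : ∀ j : Nat, (j : Int) ≤ n + 1 →
      (PySem.List.pyRange 0 (j : Int) 1).foldl
        (fun (st : Int × List Int) s =>
          let w0 := st.1 + PySem.List.pyGetD ((PySem.List.pyRange 0 (n + 1) 1).map (fun s => ct k s.toNat t)) s 0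
          let w := if 0 ≤ s - k - 1 then w0 - PySem.List.pyGetD ((PySem.List.pyRange 0 (n + 1) 1).map (fun s => ct k s.toNat t)) (s - k - 1) 0 else w0
          (w, st.2 ++ [w]))
        (0, ([] : List Int))
      = ((if j = 0 then 0 else ct k (j - 1) (t+1)),
         (PySem.List.pyRange 0 (j : Int) 1).map (fun s => ct k s.toNat (t+1))) := by
    intro j
    induction j with
    | zero =>
      intro _
      rw [Nat.cast_zero, PySem.List.pyRange_one_eq_nil (le_refl (0 : Int))]
      simp
    | succ j ih =>
      intro hle
      have hjn : (j : Int) < n + 1 := by push_cast at hle; omega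
      have hcast : (((j + 1 : Nat)) : Int) = (j : Int) + 1 := by push_cast; ring
      rw [hcast, PySem.List.pyRange_one_succ_right (a := 0) (b := (j : Int)) (by omega),
        List.foldl_append, ih (by omega), List.map_append]
      have hget : PySem.List.pyGetD ((PySem.List.pyRange 0 (n + 1) 1).map (fun s => ct k s.toNat t)) (j : Int) 0 = ct k j t := by
        rw [PySem.List.pyGetD_map_pyRange_of_nonneg _ _ _ _ (by omega) hjn]
        simp
      have hw : (if 0 ≤ (j : Int) - k - 1 then
            (if j = 0 then 0 else ct k (j - 1) (t+1)) + ct k j t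
              - PySem.List.pyGetD ((PySem.List.pyRange 0 (n + 1) 1).map (fun s => ct k s.toNat t)) ((j : Int) - k - 1) 0
          else (if j = 0 then 0 else ct k (j - 1) (t+1)) + ct k j t) = ct k j (t+1) := by
        by_cases hj0 : j = 0
        · subst hj0
          have hcond : ¬ 0 ≤ (0 : Int) - k - 1 := by omega
          simp only [Nat.cast_zero, if_neg hcond]
          rw [ct_zero k hk t, ct_zero k hk (t + 1)]
          simp
        · have hj1 : 1 ≤ j := by omega
          simp only [if_neg hj0]
          rw [ct_slide k hk t j hj1]
          by_cases hcond : 0 ≤ (j : Int) - k - 1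
          · rw [if_pos hcond, if_pos hcond,
              PySem.List.pyGetD_map_pyRange_of_nonneg _ _ _ _ hcond (by omega)]
          · rw [if_neg hcond, if_neg hcond]
            ring
      simp only [List.foldl_cons, List.foldl_nil]
      simp only [hget]
      rw [hw]
      have hne : ¬ (j + 1 = 0) := by omega
      have htn : ((j : Int)).toNat = j := by omega
      simp [htn]
  have hfin := key (n + 1).toNat (by omega)
  have hc : (((n + 1).toNat : Nat) : Int) = n + 1 := by omega
  rw [hc] at hfin
  unfold stepRow
  rw [hfin]

lemma row_zero (n k : Int) (hn : 0 < n) :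
    (PySem.List.pyRange 0 (n + 1) 1).map (fun s => ct k s.toNat 0)
      = 1 :: List.replicate n.toNat 0 := by
  rw [PySem.List.pyRange_one_cons (by omega), List.map_cons]
  have h0 : ct k (0 : Int).toNat 0 = 1 := by simp [ct]
  rw [h0]
  congr 1
  have hall : ∀ b ∈ (PySem.List.pyRange 1 (n + 1) 1).map (fun s => ct k s.toNat 0), b = (0 : Int) := by
    intro b hb
    obtain ⟨s, hs, hbs⟩ := List.mem_map.mp hb
    have hmem := (PySem.List.mem_pyRange_one).mp hs
    have hne : s.toNat ≠ 0 := by omega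
    rw [← hbs]
    simp [ct, hne]
  have hrep := List.eq_replicate_of_mem hall
  have hlen : ((PySem.List.pyRange 1 (n + 1) 1).map (fun s => ct k s.toNat 0)).length = n.toNat := by
    rw [List.length_map, PySem.List.length_pyRange_one]
    omega
  rw [hlen] at hrep
  exact hrep

lemma rows (n k : Int) (hn : 0 < n) (hk : 0 ≤ k) : ∀ t : Nat,
    (PySem.List.pyRange 0 (t : Int) 1).foldl (fun dp _ => stepRow n k dp)
        (1 :: List.replicate n.toNat 0)
      = (PySem.List.pyRange 0 (n + 1) 1).map (fun s => ct k s.toNat t) := by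
  intro t
  induction t with
  | zero =>
    rw [Nat.cast_zero, PySem.List.pyRange_one_eq_nil (le_refl (0 : Int)), List.foldl_nil, row_zero n k hn]
  | succ t ih =>
    have hcast : (((t + 1 : Nat)) : Int) = (t : Int) + 1 := by push_cast; ring
    rw [hcast, PySem.List.pyRange_one_succ_right (a := 0) (b := (t : Int)) (by omega),
      List.foldl_append, ih, List.foldl_cons, List.foldl_nil, stepRow_eq n k hn hk t]

lemma fApure_n0 (fuel : Nat) (m k : Int) : fApure fuel 0 m k = 1 := by
  cases fuel <;> simp [fApure]

lemma fApure_m0 (fuel : Nat) (n k : Int) (hn : n ≠ 0) : fApure fuel n 0 k = 0 := by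
  cases fuel <;> simp [fApure, hn]

lemma fApure_empty (fuel : Nat) (n m k : Int) (hn : n ≠ 0) (hm : m ≠ 0)
    (hL : min (k + 1) (n + 1) ≤ 0) : fApure fuel n m k = 0 := by
  cases fuel with
  | zero => simp [fApure, hn, hm]
  | succ fu =>
    simp only [fApure, if_neg hn, if_neg hm]
    rw [PySem.List.pyRange_one_eq_nil (by omega)]
    rfl

lemma fApure_eq_ct (k : Int) (hk : 0 ≤ k) : ∀ (t : Nat) (n : Int), 0 ≤ n →
    fApure t n (t : Int) k = ct k n.toNat t := by
  intro t
  induction t with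
  | zero =>
    intro n hn
    by_cases h0 : n = 0
    · subst h0; simp [fApure, ct]
    · have : n.toNat ≠ 0 := by omega
      simp [fApure, ct, h0, this]
  | succ t ih =>
    intro n hn
    by_cases h0 : n = 0
    · subst h0
      have h1 : fApure (t + 1) 0 (((t + 1 : Nat)) : Int) k = 1 := by simp [fApure]
      rw [h1, Int.toNat_zero, ct_zero k hk]
    · have hcast : (((t + 1 : Nat)) : Int) = (t : Int) + 1 := by push_cast; ring
      have hm : ((t + 1 : Nat) : Int) ≠ 0 := by omega
      simp only [fApure, if_neg h0, if_neg hm]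
      rw [PySem.List.foldl_add (PySem.List.pyRange 0 (min (k + 1) (n + 1)) 1) (fun i => fApure t (n - i) (((t + 1 : Nat) : Int) - 1) k) 0]
      have hm1 : ((t + 1 : Nat) : Int) - 1 = (t : Int) := by push_cast; ring
      rw [hm1]
      have hL : (min (k + 1) (n + 1)) - 0 = min (k + 1) (n + 1) := by ring
      rw [PySem.List.pyRange_one, hL, List.map_map]
      have hmap : (List.range (min (k + 1) (n + 1)).toNat).map
            ((fun i => fApure t (n - i) (t : Int) k) ∘ (fun j : Nat => (0 : Int) + j))
          = (List.range (min (k + 1) (n + 1)).toNat).map (fun i => ct k (n.toNat - i) t) := by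
        apply List.map_congr_left
        intro i hi
        have hilt : i < (min (k + 1) (n + 1)).toNat := List.mem_range.mp hi
        have hni : 0 ≤ n - (i : Int) := by omega
        simp only [Function.comp, zero_add]
        rw [ih (n - (i : Int)) hni]
        congr 1
        omega
      rw [hmap]
      have hct : ct k n.toNat (t + 1)
          = ((List.range (min (k + 1) ((n.toNat : Int) + 1)).toNat).map (fun i => ct k (n.toNat - i) t)).sum := by
        rfl
      rw [hct]
      have : ((n.toNat : Int) + 1) = n + 1 := by omega
      rw [this]
      ring

lemma ct_big (k : Int) : ∀ (t : Nat) (s : Nat), (t : Int) * k < (s : Int) → ct k s t = 0 := by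
  intro t
  induction t with
  | zero =>
    intro s hs
    have : s ≠ 0 := by omega
    simp [ct, this]
  | succ t ih =>
    intro s hs
    show ((List.range (min (k + 1) ((s : Int) + 1)).toNat).map (fun i => ct k (s - i) t)).sum = 0
    apply List.sum_eq_zero
    intro x hx
    obtain ⟨i, hi, hix⟩ := List.mem_map.mp hx
    have hilt : i < (min (k + 1) ((s : Int) + 1)).toNat := List.mem_range.mp hi
    rw [← hix]
    apply ih
    have hik : (i : Int) ≤ k := by omega
    have hsub : ((s - i : Nat) : Int) = (s : Int) - i := by omega
    have hexp : (((t + 1 : Nat)) : Int) * k = (t : Int) * k + k := by push_cast; ring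
    rw [hexp] at hs
    rw [hsub]
    linarith

-- ===== VERDICT (by name: the statement is the Claim_ definition above) =====
theorem f_spec : Claim_equal_f := by
  intro n m k _ hpre
  unfold Spec_f
  rw [f_eq_pure n m k]
  unfold f_alt
  by_cases h0 : n = 0
  · subst h0; simp [fApure_n0]
  by_cases hnneg : n < 0
  · rw [if_neg h0, if_pos (Or.inl hnneg)]
    by_cases hm0 : m = 0
    · subst hm0; simp [fApure_m0 _ _ _ h0]
    · exact fApure_empty m.toNat n m k h0 hm0 (by omega)
  have hnpos : 0 < n := by omega
  by_cases hkneg : k < 0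
  · rw [if_neg h0, if_pos (Or.inr (Or.inr hkneg))]
    by_cases hm0 : m = 0
    · subst hm0; simp [fApure_m0 _ _ _ h0]
    · exact fApure_empty m.toNat n m k h0 hm0 (by omega)
  have hk : 0 ≤ k := by omega
  by_cases hm : m ≤ 0
  · by_cases hm0 : m = 0
    · subst hm0
      rw [if_neg h0, if_pos (Or.inr (Or.inl le_rfl))]
      simp [fApure_m0 _ _ _ h0]
    · exact absurd ⟨hnpos, hk, Or.inl (by omega)⟩ hpre
  have hmpos : 0 < m := by omega
  have hnot : ¬ (n < 0 ∨ m ≤ 0 ∨ k < 0) := by omega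
  rw [if_neg h0, if_neg hnot]
  have hmc : m = ((m.toNat : Nat) : Int) := by omega
  rw [hmc, Int.toNat_natCast, fApure_eq_ct k hk m.toNat n (by omega)]
  have hme : ((m.toNat : Nat) : Int) = m := by omega
  have hne : ((n.toNat : Nat) : Int) = n := by omega
  by_cases hbig : m * k < n
  · rw [if_pos (by rw [hme]; exact hbig)]
    exact ct_big k m.toNat n.toNat (by rw [hme, hne]; exact hbig)
  · rw [if_neg (by rw [hme]; exact hbig),
      rows n k hnpos hk m.toNat]
    rw [PySem.List.pyRange_one_succ_right (by omega : (0:Int) ≤ n), List.map_append,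
      List.map_cons, List.map_nil, PySem.List.pyGetD_neg_one_append_singleton]
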